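-- pv_equiv track=rewrite | github.com/Nebsorg/AdventOfCode2021 | Day3.py | evaluate
-- ===== SOURCE A (Python) =====
-- def evaluate(instructions, digitPosition):
--     mask = 0
--     for instruction in instructions:
--         if instruction[digitPosition] == '1':
--             mask += 1
--         else:
--             mask -= 1
--     return(mask)
-- ===== SOURCE B (Python) =====
-- def evaluate(instructions, digitPosition):
--     # Divide and conquer: split the list in half, evaluate each half
--     # recursively, and add the two partial balances.
--     if not instructions:
--         return 0
--     if len(instructions) == 1:
--         return 1 if instructions[0][digitPosition] == '1' else -1
--     mid = len(instructions) // 2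
--     return (evaluate(instructions[:mid], digitPosition)
--             + evaluate(instructions[mid:], digitPosition))
-- ===== Notes on version B (the rewrite author's own statement) =====
-- stated objective: alternative
-- what changed: Replaces the linear +1/-1 accumulator loop with a divide-and-conquer recursion that splits the list in half and adds the two partial balances.
import Mathlib
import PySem

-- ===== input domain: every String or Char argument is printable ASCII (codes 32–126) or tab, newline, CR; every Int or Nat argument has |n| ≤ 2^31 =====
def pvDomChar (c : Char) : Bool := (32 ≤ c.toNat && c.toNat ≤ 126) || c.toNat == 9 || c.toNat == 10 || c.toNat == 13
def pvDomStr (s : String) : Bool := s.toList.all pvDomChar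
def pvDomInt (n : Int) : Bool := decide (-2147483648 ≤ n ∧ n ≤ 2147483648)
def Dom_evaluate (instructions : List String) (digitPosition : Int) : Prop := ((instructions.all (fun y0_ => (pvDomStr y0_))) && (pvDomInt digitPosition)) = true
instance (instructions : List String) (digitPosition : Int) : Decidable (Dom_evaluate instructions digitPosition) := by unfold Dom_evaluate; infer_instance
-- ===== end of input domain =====

-- B is an alternative divide-and-conquer decomposition of A's linear +1/-1 loop (same cost class).

-- ===== PORT A =====
-- A's loop: mask starts 0; +1 when instruction[digitPosition] == '1', else -1.
def evaluate (instructions : List String) (digitPosition : Int) : Int :=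
  instructions.foldl
    (fun mask instruction =>
      match PySem.Str.pyGet? instruction digitPosition with
      | some c => if c = '1' then mask + 1 else mask - 1
      | none => mask)  -- unreachable under Pre_evaluate (Python raises IndexError)
    0

-- ===== PORT B =====
-- B: divide and conquer; base cases [] and [x], otherwise split at mid = len // 2 and add.
-- Python's slices l[:mid] / l[mid:] with 0 ≤ mid ≤ len are exactly take/drop
-- (PySem.List.slice_to_natCast / slice_from_natCast), and len(l) // 2 on a Nat is l.length / 2.
def evaluate_alt (instructions : List String) (digitPosition : Int) : Int :=
  match instructions with
  | [] => 0
  | [x] => if PySem.Str.pyGet? x digitPosition = some '1' then 1 else -1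
  | x :: y :: rest =>
    let mid : Nat := (x :: y :: rest).length / 2
    evaluate_alt ((x :: y :: rest).take mid) digitPosition
      + evaluate_alt ((x :: y :: rest).drop mid) digitPosition
  termination_by instructions.length
  decreasing_by
    · simp; omega
    · simp; omega

-- ===== PRECONDITION & SPEC =====
-- Pre_ excludes inputs where some instruction[digitPosition] is an IndexError (A raises there).
def Pre_evaluate (instructions : List String) (digitPosition : Int) : Prop :=
  ∀ s ∈ instructions, PySem.Raise.InRange s.toList.length digitPosition
instance (instructions : List String) (digitPosition : Int) : Decidable (Pre_evaluate instructions digitPosition) := by unfold Pre_evaluate; infer_instance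
def pvWitness_evaluate : List String × Int := (["101", "011", "110"], 1)

def Spec_evaluate (instructions : List String) (digitPosition : Int) (out : Int) : Prop := out = evaluate_alt instructions digitPosition
instance (instructions : List String) (digitPosition : Int) (out : Int) : Decidable (Spec_evaluate instructions digitPosition out) := by unfold Spec_evaluate; infer_instance

-- ===== CLAIM (what is proved, stated in full; the proofs are below) =====
def Claim_equal_evaluate : Prop := ∀ (instructions : List String) (digitPosition : Int), Dom_evaluate instructions digitPosition → Pre_evaluate instructions digitPosition → Spec_evaluate instructions digitPosition (evaluate instructions digitPosition)

-- ===== LEMMAS AND PROOFS =====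

-- per-element contribution
def pvContrib (digitPosition : Int) (s : String) : Int :=
  if PySem.Str.pyGet? s digitPosition = some '1' then 1 else -1

-- A's foldl equals m + sum of contributions, unless some lookup raises.
lemma evaluate_foldl (digitPosition : Int) (instructions : List String) (m : Int) :
    instructions.foldl
      (fun mask instruction =>
        match PySem.Str.pyGet? instruction digitPosition with
        | some c => if c = '1' then mask + 1 else mask - 1
        | none => mask)
      m
    = m + ((instructions.map (pvContrib digitPosition)).sum)
    ∨ ∃ s ∈ instructions, PySem.Str.pyGet? s digitPosition = none := by
  induction instructions generalizing m with
  | nil => left; simp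
  | cons x xs ih =>
    rcases h : PySem.Str.pyGet? x digitPosition with _ | c
    · right; exact ⟨x, List.mem_cons_self, h⟩
    · rcases ih (if c = '1' then m + 1 else m - 1) with h2 | ⟨s, hs, hn⟩
      · left
        simp only [List.foldl_cons, h, h2, List.map_cons, List.sum_cons, pvContrib]
        by_cases hc : c = '1' <;> simp [hc] <;> ring
      · right; exact ⟨s, List.mem_cons_of_mem _ hs, hn⟩

-- B's divide-and-conquer equals the sum of contributions (strong induction on length).
lemma alt_eq_sum (digitPosition : Int) :
    ∀ n (l : List String), l.length ≤ n →
      evaluate_alt l digitPosition = (l.map (pvContrib digitPosition)).sum := by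
  intro n
  induction n with
  | zero => intro l hl; simp at hl; simp [hl, evaluate_alt]
  | succ n ih =>
    intro l hl
    match l with
    | [] => simp [evaluate_alt]
    | [x] => simp [evaluate_alt, pvContrib]
    | x :: y :: rest =>
      rw [evaluate_alt]
      have hlen : (x :: y :: rest).length = rest.length + 2 := by simp
      have h1 : ((x :: y :: rest).take ((x :: y :: rest).length / 2)).length ≤ n := by
        simp at hl ⊢; omega
      have h2 : ((x :: y :: rest).drop ((x :: y :: rest).length / 2)).length ≤ n := by
        simp at hl ⊢; omega
      rw [ih _ h1, ih _ h2, ← List.sum_append, ← List.map_append, List.take_append_drop]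

-- ===== VERDICT (by name: the statement is the Claim_ definition above) =====
theorem evaluate_spec : Claim_equal_evaluate := by
  intro instructions digitPosition _ hpre
  unfold Spec_evaluate evaluate
  rw [alt_eq_sum digitPosition instructions.length instructions le_rfl]
  rcases evaluate_foldl digitPosition instructions 0 with h | ⟨s, hs, hn⟩
  · simpa using h
  · exact absurd (hpre s hs) (by simpa [PySem.List.pyGet?_eq_none_iff, PySem.Str.len_eq, PySem.Str.pyGet?] using hn)
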